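-- pv_equiv track=rewrite | github.com/DanilMarinkovic/WikiShortestPath | wiki_shortest_path.py | should_skip_page
-- ===== SOURCE A (Python) =====
-- def should_skip_page(title):
--     skip_prefixes = [
--         "Category:", "File:", "Template:", "Wikipedia:",
--         "Help:", "Portal:", "Talk:", "User:", "Special:",
--         "Media:", "MediaWiki:", "Module:", "Draft:",
--     ]
--
--     for prefix in skip_prefixes:
--         if title.startswith(prefix):
--             return True
--
--     if "(disambiguation)" in title:
--         return True
--
--     return False
-- ===== SOURCE B (Python) =====
-- PREFIXES = [
--     "Category:", "File:", "Template:", "Wikipedia:",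
--     "Help:", "Portal:", "Talk:", "User:", "Special:",
--     "Media:", "MediaWiki:", "Module:", "Draft:",
-- ]
--
--
-- def should_skip_page(title):
--     # Multi-pattern prefix match by simultaneous "derivative" scan: walk the title
--     # once, keeping the still-viable pattern suffixes; a pattern fully consumed
--     # means some prefix matched.
--     cands = PREFIXES
--     for ch in title:
--         cands = [p[1:] for p in cands if p[:1] == ch]
--         if "" in cands:
--             return True
--         if not cands:
--             break
--     return "(disambiguation)" in title
-- ===== Notes on version B (the rewrite author's own statement) =====
-- stated objective: alternative
-- what changed: Instead of testing each of the 13 prefixes with startswith in turn, B scans the title once character by character, maintaining the set of still-viable pattern suffixes (a Brzozowski-derivative / trie-walk multi-pattern match) and reporting a match when a pattern is fully consumed.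
import Mathlib
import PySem

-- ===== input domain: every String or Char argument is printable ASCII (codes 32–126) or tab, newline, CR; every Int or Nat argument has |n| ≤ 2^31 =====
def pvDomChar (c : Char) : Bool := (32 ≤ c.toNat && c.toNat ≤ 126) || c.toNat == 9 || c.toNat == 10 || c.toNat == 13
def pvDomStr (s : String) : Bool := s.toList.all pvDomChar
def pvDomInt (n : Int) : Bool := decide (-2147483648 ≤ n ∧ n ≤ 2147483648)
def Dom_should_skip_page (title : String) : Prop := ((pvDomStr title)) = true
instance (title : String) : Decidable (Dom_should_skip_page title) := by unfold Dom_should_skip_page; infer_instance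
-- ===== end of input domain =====

-- B replaces the per-prefix startswith loop by one character-by-character scan of the
-- title maintaining the still-viable pattern suffixes (derivative multi-pattern match);
-- objective: alternative algorithm, same cost.


-- ===== PORT A =====
def skipPrefixes : List String :=
  ["Category:", "File:", "Template:", "Wikipedia:",
   "Help:", "Portal:", "Talk:", "User:", "Special:",
   "Media:", "MediaWiki:", "Module:", "Draft:"]

-- the for-loop with early return
def skipLoop : List String → String → Bool
  | [], _ => false
  | p :: rest, title =>
    if PySem.Str.startswith title p then true else skipLoop rest title

def should_skip_page (title : String) : Bool :=
  if skipLoop skipPrefixes title then true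
  else if PySem.Str.isIn "(disambiguation)" title then true
  else false

-- ===== PORT B =====
-- module-level PREFIXES, as char lists (title iteration is over characters)
def pvPrefixes : List (List Char) :=
  [['C','a','t','e','g','o','r','y',':'],
   ['F','i','l','e',':'],
   ['T','e','m','p','l','a','t','e',':'],
   ['W','i','k','i','p','e','d','i','a',':'],
   ['H','e','l','p',':'],
   ['P','o','r','t','a','l',':'],
   ['T','a','l','k',':'],
   ['U','s','e','r',':'],
   ['S','p','e','c','i','a','l',':'],
   ['M','e','d','i','a',':'],
   ['M','e','d','i','a','W','i','k','i',':'],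
   ['M','o','d','u','l','e',':'],
   ['D','r','a','f','t',':']]

-- cands = [p[1:] for p in cands if p[:1] == ch]
def pvStep (cands : List (List Char)) (ch : Char) : List (List Char) :=
  cands.filterMap fun p =>
    match p with
    | [] => none
    | x :: xs => if x = ch then some xs else none

-- the for-loop over the title's characters, with its early return / break
def pvScan : List Char → List (List Char) → Bool
  | [], _ => false
  | ch :: rest, cands =>
    let cands' := pvStep cands ch
    if ([] : List Char) ∈ cands' then true
    else if cands' = [] then false
    else pvScan rest cands'

def should_skip_page_alt (title : String) : Bool :=
  if pvScan title.toList pvPrefixes then true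
  else PySem.Str.isIn "(disambiguation)" title

-- ===== PRECONDITION & SPEC =====
def Spec_should_skip_page (title : String) (out : Bool) : Prop := out = should_skip_page_alt title
instance (title : String) (out : Bool) : Decidable (Spec_should_skip_page title out) := by unfold Spec_should_skip_page; infer_instance

-- ===== CLAIM (what is proved, stated in full; the proofs are below) =====
def Claim_equal_should_skip_page : Prop := ∀ (title : String), Dom_should_skip_page title → Spec_should_skip_page title (should_skip_page title)

-- ===== LEMMAS AND PROOFS =====

theorem mem_pvStep (cands : List (List Char)) (ch : Char) (q : List Char) :
    q ∈ pvStep cands ch ↔ (ch :: q) ∈ cands := by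
  simp only [pvStep, List.mem_filterMap]
  constructor
  · rintro ⟨p, hp, he⟩
    cases p with
    | nil => simp at he
    | cons x xs =>
      have he' : (if x = ch then some xs else none) = some q := he
      by_cases hx : x = ch
      · rw [if_pos hx] at he'
        cases he'
        exact hx ▸ hp
      · rw [if_neg hx] at he'
        cases he'
  · intro h
    exact ⟨ch :: q, h, by simp⟩

theorem pvScan_iff (l : List Char) (cands : List (List Char)) :
    pvScan l cands = true ↔ ∃ p ∈ cands, p ≠ [] ∧ p <+: l := by
  induction l generalizing cands with
  | nil =>
    simp only [pvScan]
    refine iff_of_false (by simp) ?_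
    rintro ⟨p, _, hne, hp⟩
    exact hne (List.prefix_nil.mp hp)
  | cons ch rest ih =>
    simp only [pvScan]
    by_cases hmem : ([] : List Char) ∈ pvStep cands ch
    · rw [if_pos hmem]
      exact iff_of_true rfl ⟨[ch], (mem_pvStep _ _ _).mp hmem, by simp, by simp⟩
    · rw [if_neg hmem]
      by_cases hnil : pvStep cands ch = []
      · rw [if_pos hnil]
        refine iff_of_false (by simp) ?_
        rintro ⟨p, hp, hne, hpre⟩
        cases p with
        | nil => exact hne rfl
        | cons x xs =>
          obtain ⟨hx, hxs⟩ := List.cons_prefix_cons.mp hpre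
          have : xs ∈ pvStep cands ch := (mem_pvStep _ _ _).mpr (hx ▸ hp)
          rw [hnil] at this
          cases this
      · rw [if_neg hnil, ih]
        constructor
        · rintro ⟨q, hq, hqne, hqpre⟩
          exact ⟨ch :: q, (mem_pvStep _ _ _).mp hq, by simp,
            List.cons_prefix_cons.mpr ⟨rfl, hqpre⟩⟩
        · rintro ⟨p, hp, hne, hpre⟩
          cases p with
          | nil => exact absurd rfl hne
          | cons x xs =>
            obtain ⟨hx, hxs⟩ := List.cons_prefix_cons.mp hpre
            have hxsm : xs ∈ pvStep cands ch := (mem_pvStep _ _ _).mpr (hx ▸ hp)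
            cases xs with
            | nil => exact absurd hxsm hmem
            | cons y ys => exact ⟨y :: ys, hxsm, by simp, hxs⟩

theorem skipLoop_iff (ps : List String) (title : String) :
    skipLoop ps title = true ↔ ∃ p ∈ ps, p.toList <+: title.toList := by
  induction ps with
  | nil =>
    simp [skipLoop]
  | cons p rest ih =>
    simp only [skipLoop]
    by_cases h : PySem.Str.startswith title p = true
    · rw [if_pos h]
      rw [PySem.Str.startswith_eq] at h
      exact iff_of_true rfl ⟨p, List.mem_cons_self, (PySem.Chars.startswith_iff _ _).mp h⟩
    · rw [if_neg h, ih]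
      constructor
      · rintro ⟨q, hq, hpre⟩
        exact ⟨q, List.mem_cons_of_mem _ hq, hpre⟩
      · rintro ⟨q, hq, hpre⟩
        rcases List.mem_cons.mp hq with rfl | hq'
        · refine absurd ?_ h
          rw [PySem.Str.startswith_eq]
          exact (PySem.Chars.startswith_iff _ _).mpr hpre
        · exact ⟨q, hq', hpre⟩

theorem pvPrefixes_eq : pvPrefixes = skipPrefixes.map String.toList := by decide

theorem skipPrefixes_ne_nil : ∀ p ∈ skipPrefixes, p.toList ≠ [] := by decide

-- both matchers decide the same proposition: some listed prefix is a prefix of the title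
theorem loop_eq_scan (title : String) :
    skipLoop skipPrefixes title = pvScan title.toList pvPrefixes := by
  rw [Bool.eq_iff_iff, pvScan_iff, skipLoop_iff]
  constructor
  · rintro ⟨p, hp, hpre⟩
    exact ⟨p.toList, pvPrefixes_eq ▸ List.mem_map_of_mem hp,
      skipPrefixes_ne_nil p hp, hpre⟩
  · rintro ⟨q, hq, _, hpre⟩
    rw [pvPrefixes_eq] at hq
    obtain ⟨p, hp, rfl⟩ := List.mem_map.mp hq
    exact ⟨p, hp, hpre⟩

theorem main_eq (title : String) : should_skip_page title = should_skip_page_alt title := by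
  unfold should_skip_page should_skip_page_alt
  rw [loop_eq_scan]
  cases pvScan title.toList pvPrefixes <;> simp

-- ===== VERDICT (by name: the statement is the Claim_ definition above) =====
theorem should_skip_page_spec : Claim_equal_should_skip_page := by
  intro title _
  unfold Spec_should_skip_page
  exact main_eq title
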